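-- pv_equiv track=rewrite | github.com/Syncronate/Dashboard-Previsionale-2.0 | Previsioni_Thunder_3h.py | _build_category_map
-- ===== SOURCE A (Python) =====
-- HORIZON_FEATURE_CATEGORIES = {
--     "pioggia_montana": ["Arcevia", "1295"],
--     "pioggia_intermedia": ["Corinaldo", "Barbara", "2858", "2964"],
--     "pioggia_locale": ["Bettolelle", "2637"],
--     "idrometri_monte": ["Serra dei Conti", "1008"],
--     "idrometri_intermedi": ["Pianello", "Nevola", "3072", "1283", "Passo Ripe"],
--     "suolo": ["soil_moisture"],
--     "stagionalita": ["Seasonality"]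
-- }
--
-- def _build_category_map(feature_names: list) -> dict:
--     """Map each feature index to its category."""
--     category_map = {}
--     for idx, fname in enumerate(feature_names):
--         fname_lower = fname.lower()
--         found_category = "other"  # Default category
--         for category, keywords in HORIZON_FEATURE_CATEGORIES.items():
--             for keyword in keywords:
--                 if keyword.lower() in fname_lower:
--                     found_category = category
--                     break
--             if found_category != "other":
--                 break
--         category_map[idx] = found_category
--     return category_map
-- ===== SOURCE B (Python) =====
-- HORIZON_FEATURE_CATEGORIES = {
--     "pioggia_montana": ["Arcevia", "1295"],
--     "pioggia_intermedia": ["Corinaldo", "Barbara", "2858", "2964"],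
--     "pioggia_locale": ["Bettolelle", "2637"],
--     "idrometri_monte": ["Serra dei Conti", "1008"],
--     "idrometri_intermedi": ["Pianello", "Nevola", "3072", "1283", "Passo Ripe"],
--     "suolo": ["soil_moisture"],
--     "stagionalita": ["Seasonality"]
-- }
--
-- def _build_category_map(feature_names: list) -> dict:
--     """Map each feature index to its category (staged passes: category-outer)."""
--     lowered = [f.lower() for f in feature_names]
--     assigned = {}
--     # One pass per category, in priority order: claim every still-unassigned index
--     # whose name contains one of the category's keywords. An index claimed by an
--     # earlier category is never reassigned, which reproduces first-match priority.
--     for category, keywords in HORIZON_FEATURE_CATEGORIES.items():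
--         kws = [k.lower() for k in keywords]
--         for idx, fname in enumerate(lowered):
--             if idx not in assigned and any(k in fname for k in kws):
--                 assigned[idx] = category
--     return {idx: assigned.get(idx, "other") for idx in range(len(feature_names))}
-- ===== Notes on version B (the rewrite author's own statement) =====
-- stated objective: alternative
-- what changed: Reverses the loop nesting: instead of scanning all categories per name with break flags, B makes one staged pass per category over the still-unassigned indices, claiming matching names into a dict and filling 'other' defaults at the end; first-match priority follows from never reassigning a claimed index.
import Mathlib
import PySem

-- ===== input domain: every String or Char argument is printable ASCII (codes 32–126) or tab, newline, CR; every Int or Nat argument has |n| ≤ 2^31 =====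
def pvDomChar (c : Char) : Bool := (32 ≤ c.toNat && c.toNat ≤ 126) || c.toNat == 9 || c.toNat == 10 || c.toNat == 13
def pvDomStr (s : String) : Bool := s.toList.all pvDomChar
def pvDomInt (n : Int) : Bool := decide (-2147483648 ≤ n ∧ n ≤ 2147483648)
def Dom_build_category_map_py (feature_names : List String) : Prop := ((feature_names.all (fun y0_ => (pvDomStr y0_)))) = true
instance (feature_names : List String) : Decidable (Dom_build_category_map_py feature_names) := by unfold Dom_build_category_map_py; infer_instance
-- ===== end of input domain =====

-- B reverses the loop nesting: instead of scanning all categories per name, it makes one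
-- pass per category over the still-unassigned indices (objective: alternative).

-- ===== PORT A =====
def HORIZON_FEATURE_CATEGORIES : List (String × List String) :=
  [("pioggia_montana", ["Arcevia", "1295"]),
   ("pioggia_intermedia", ["Corinaldo", "Barbara", "2858", "2964"]),
   ("pioggia_locale", ["Bettolelle", "2637"]),
   ("idrometri_monte", ["Serra dei Conti", "1008"]),
   ("idrometri_intermedi", ["Pianello", "Nevola", "3072", "1283", "Passo Ripe"]),
   ("suolo", ["soil_moisture"]),
   ("stagionalita", ["Seasonality"])]

-- inner 'for keyword in keywords: if … break' loop
def aKwLoop (fname_lower : List Char) (category : String) : List String → String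
  | [] => "other"
  | keyword :: rest =>
      if PySem.Chars.isIn (PySem.Chars.lower keyword.toList) fname_lower then category
      else aKwLoop fname_lower category rest

-- outer 'for category, keywords in …: …; if found_category != "other": break' loop
def aCatLoop (fname_lower : List Char) : List (String × List String) → String
  | [] => "other"
  | (category, keywords) :: rest =>
      let found := aKwLoop fname_lower category keywords
      if found ≠ "other" then found else aCatLoop fname_lower rest

def build_category_map_py (feature_names : List String) : List (Int × String) :=
  ((PySem.List.enumerate feature_names 0).foldl
      (fun category_map p =>
        category_map.insert p.1 (aCatLoop (PySem.Chars.lower p.2.toList) HORIZON_FEATURE_CATEGORIES))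
      PySem.Dict.empty).items

-- ===== PORT B =====
-- any(k in fname for k in kws)
def bMatch (kws : List (List Char)) (fname : List Char) : Bool :=
  kws.any (fun k => PySem.Chars.isIn k fname)

-- inner 'for idx, fname in enumerate(lowered): if idx not in assigned and any(…): assigned[idx] = category'
def bInner (lowered : List (List Char)) (d : PySem.Dict Int String)
    (category : String) (kws : List (List Char)) : PySem.Dict Int String :=
  (PySem.List.enumerate lowered 0).foldl
    (fun d p => if !d.contains p.1 && bMatch kws p.2 then d.insert p.1 category else d) d

def build_category_map_py_alt (feature_names : List String) : List (Int × String) :=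
  let lowered := feature_names.map (fun f => PySem.Chars.lower f.toList)
  let assigned := HORIZON_FEATURE_CATEGORIES.foldl
    (fun d c => bInner lowered d c.1 (c.2.map (fun k => PySem.Chars.lower k.toList)))
    PySem.Dict.empty
  ((PySem.List.pyRange 0 (PySem.List.len feature_names) 1).foldl
    (fun d idx => d.insert idx (assigned.getD idx "other")) PySem.Dict.empty).items

-- ===== PRECONDITION & SPEC =====
def Spec_build_category_map_py (feature_names : List String) (out : List (Int × String)) : Prop := out = build_category_map_py_alt feature_names
instance (feature_names : List String) (out : List (Int × String)) : Decidable (Spec_build_category_map_py feature_names out) := by unfold Spec_build_category_map_py; infer_instance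

-- ===== CLAIM (what is proved, stated in full; the proofs are below) =====
def Claim_equal_build_category_map_py : Prop := ∀ (feature_names : List String), Dom_build_category_map_py feature_names → Spec_build_category_map_py feature_names (build_category_map_py feature_names)

-- ===== LEMMAS AND PROOFS =====

-- B's inner pass never touches a key that is not among the pairs' indices
theorem bInner_foldl_get?_of_not_mem (cat : String) (kws : List (List Char))
    (ps : List (Int × List Char)) (d : PySem.Dict Int String) (i : Int)
    (h : i ∉ ps.map Prod.fst) :
    ((ps.foldl (fun d p => if !d.contains p.1 && bMatch kws p.2 then d.insert p.1 cat else d) d).get? i)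
      = d.get? i := by
  induction ps generalizing d with
  | nil => rfl
  | cons p rest ih =>
      simp only [List.map_cons, List.mem_cons, not_or] at h
      simp only [List.foldl_cons]
      rw [ih _ h.2]
      split
      · exact PySem.Dict.get?_insert_of_ne _ _ h.1
      · rfl

-- lookup characterization of one pass of B's inner loop (over pairs with distinct keys)
theorem bInner_foldl_get? (cat : String) (kws : List (List Char))
    (ps : List (Int × List Char)) (d : PySem.Dict Int String) (i : Int)
    (hnd : (ps.map Prod.fst).Nodup) :
    ((ps.foldl (fun d p => if !d.contains p.1 && bMatch kws p.2 then d.insert p.1 cat else d) d).get? i)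
      = match d.get? i with
        | some v => some v
        | none => if ps.any (fun p => p.1 == i && bMatch kws p.2) then some cat else none := by
  induction ps generalizing d with
  | nil => cases hd : d.get? i <;> simp [hd]
  | cons p rest ih =>
      simp only [List.map_cons, List.nodup_cons] at hnd
      obtain ⟨hrest0, hnd2⟩ := hnd
      simp only [List.foldl_cons, List.any_cons]
      by_cases hp : p.1 = i
      · subst hp
        have hnone : (rest.any fun q => q.1 == p.1 && bMatch kws q.2) = false := by
          rw [List.any_eq_false]
          intro q hq
          have hne : q.1 ≠ p.1 := fun he => hrest0 (he ▸ List.mem_map_of_mem hq)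
          simp [hne]
        cases hd : d.get? p.1 with
        | some v =>
            have hc : d.contains p.1 = true := by
              rw [PySem.Dict.contains_eq_isSome_get?, hd]; rfl
            have hstep : (if !d.contains p.1 && bMatch kws p.2 then d.insert p.1 cat else d) = d := by
              rw [hc]; simp
            rw [hstep, bInner_foldl_get?_of_not_mem cat kws rest d p.1 hrest0, hd]
        | none =>
            have hc : d.contains p.1 = false := by
              rw [PySem.Dict.contains_eq_isSome_get?, hd]; rfl
            by_cases hm : bMatch kws p.2 = true
            · have hstep : (if !d.contains p.1 && bMatch kws p.2 then d.insert p.1 cat else d)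
                  = d.insert p.1 cat := by rw [hc, hm]; simp
              rw [hstep, bInner_foldl_get?_of_not_mem cat kws rest _ p.1 hrest0,
                  PySem.Dict.get?_insert_self]
              simp [hm]
            · rw [Bool.not_eq_true] at hm
              have hstep : (if !d.contains p.1 && bMatch kws p.2 then d.insert p.1 cat else d) = d := by
                rw [hm]; simp
              rw [hstep, bInner_foldl_get?_of_not_mem cat kws rest d p.1 hrest0, hd]
              simp [hnone, hm]
      · have hpe : (p.1 == i) = false := by simp [hp]
        have hstep : ((if !d.contains p.1 && bMatch kws p.2 then d.insert p.1 cat else d) :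
            PySem.Dict Int String).get? i = d.get? i := by
          split
          · exact PySem.Dict.get?_insert_of_ne _ _ (fun he => hp he.symm)
          · rfl
        rw [ih _ hnd2, hstep]
        simp only [hpe, Bool.false_and, Bool.false_or]

-- the 'any' condition over enumerate at a fixed in-range index reads just that element
theorem any_enumerate_at (f : List Char → Bool) (xs : List (List Char)) (i : Int)
    (h0 : 0 ≤ i) (hlt : i.toNat < xs.length) :
    (PySem.List.enumerate xs 0).any (fun p => p.1 == i && f p.2) = f xs[i.toNat] := by
  cases hf : f xs[i.toNat] with
  | true =>
      rw [List.any_eq_true]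
      refine ⟨(i, xs[i.toNat]), ?_, by simp [hf]⟩
      rw [PySem.List.mem_enumerate_iff]
      exact ⟨i.toNat, hlt, by simp; omega⟩
  | false =>
      rw [List.any_eq_false]
      intro p hp
      rw [PySem.List.mem_enumerate_iff] at hp
      obtain ⟨k, hk, rfl⟩ := hp
      simp only [Bool.and_eq_true, beq_iff_eq, not_and]
      intro he
      have : k = i.toNat := by omega
      subst this
      simp [hf]

-- lookup characterization of B's whole staged fold over the category list
theorem stage_get? (lowered : List (List Char)) (cs : List (String × List String))
    (d : PySem.Dict Int String) (i : Int) (h0 : 0 ≤ i) (hlt : i.toNat < lowered.length) :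
    ((cs.foldl (fun d c => bInner lowered d c.1 (c.2.map (fun k => PySem.Chars.lower k.toList))) d).get? i)
      = match d.get? i with
        | some v => some v
        | none =>
            match cs.find? (fun c => bMatch (c.2.map (fun k => PySem.Chars.lower k.toList)) lowered[i.toNat]) with
            | some c => some c.1
            | none => none := by
  induction cs generalizing d with
  | nil => cases hd : d.get? i <;> simp [hd]
  | cons c rest ih =>
      simp only [List.foldl_cons]
      rw [ih]
      have hnd : ((PySem.List.enumerate lowered 0).map Prod.fst).Nodup := by
        rw [PySem.List.map_fst_enumerate]
        exact PySem.List.nodup_pyRange_one 0 _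
      rw [show (bInner lowered d c.1 (c.2.map fun k => PySem.Chars.lower k.toList)).get? i = _ from
            bInner_foldl_get? _ _ _ d i hnd]
      rw [any_enumerate_at _ _ _ h0 hlt]
      rw [List.find?_cons]
      cases hd : d.get? i with
      | some v =>
          cases hm : bMatch (c.2.map fun k => PySem.Chars.lower k.toList) lowered[i.toNat] <;> simp
      | none =>
          cases hm : bMatch (c.2.map fun k => PySem.Chars.lower k.toList) lowered[i.toNat] with
          | true => simp
          | false => simp

-- A's inner keyword loop is the 'any' test choosing cat or "other"
theorem aKwLoop_eq_any (fl : List Char) (cat : String) (kws : List String) :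
    aKwLoop fl cat kws =
      if kws.any (fun kw => PySem.Chars.isIn (PySem.Chars.lower kw.toList) fl) then cat else "other" := by
  induction kws with
  | nil => rfl
  | cons kw rest ih =>
      simp only [aKwLoop, List.any_cons]
      by_cases h : PySem.Chars.isIn (PySem.Chars.lower kw.toList) fl = true
      · simp [h]
      · simp only [Bool.not_eq_true] at h
        simp [h, ih]

-- A's nested loops with breaks are the first category whose keyword matches
theorem aCatLoop_eq_find? (fl : List Char) (cats : List (String × List String))
    (hne : ∀ c ∈ cats, c.1 ≠ "other") :
    aCatLoop fl cats =
      match cats.find? (fun c => c.2.any (fun kw => PySem.Chars.isIn (PySem.Chars.lower kw.toList) fl)) with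
      | some c => c.1
      | none => "other" := by
  induction cats with
  | nil => rfl
  | cons c rest ih =>
      obtain ⟨cat, kws⟩ := c
      have hcat : cat ≠ "other" := hne (cat, kws) List.mem_cons_self
      have hrest : ∀ c ∈ rest, c.1 ≠ "other" := fun c hc => hne c (List.mem_cons_of_mem _ hc)
      simp only [aCatLoop, aKwLoop_eq_any, List.find?_cons]
      cases hm : kws.any (fun kw => PySem.Chars.isIn (PySem.Chars.lower kw.toList) fl) with
      | true => simp [hcat]
      | false => simp [ih hrest]

-- pointwise agreement: A's per-name scan equals B's staged lookup at every in-range index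
theorem point_eq (feature_names : List String) (i : Int) (h0 : 0 ≤ i)
    (hlt : i.toNat < feature_names.length) :
    aCatLoop (PySem.Chars.lower (PySem.List.pyGetD feature_names i "").toList)
      HORIZON_FEATURE_CATEGORIES
    = ((HORIZON_FEATURE_CATEGORIES.foldl
          (fun d c => bInner (feature_names.map (fun f => PySem.Chars.lower f.toList)) d c.1
            (c.2.map (fun k => PySem.Chars.lower k.toList)))
          PySem.Dict.empty).getD i "other") := by
  have hlt' : i.toNat < (feature_names.map (fun f => PySem.Chars.lower f.toList)).length := by
    simpa using hlt
  rw [PySem.Dict.getD_eq_get?_getD, stage_get? _ _ _ i h0 hlt', PySem.Dict.get?_empty]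
  rw [PySem.List.pyGetD_eq_getElem feature_names "" h0 (by omega)]
  rw [aCatLoop_eq_find? _ _ (by decide)]
  have hget : (feature_names.map (fun f => PySem.Chars.lower f.toList))[i.toNat]
      = PySem.Chars.lower feature_names[i.toNat].toList := List.getElem_map _
  rw [hget]
  have hpred : (fun c : String × List String =>
        bMatch (c.2.map (fun k => PySem.Chars.lower k.toList)) (PySem.Chars.lower feature_names[i.toNat].toList))
      = (fun c : String × List String =>
        c.2.any (fun kw => PySem.Chars.isIn (PySem.Chars.lower kw.toList) (PySem.Chars.lower feature_names[i.toNat].toList))) := by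
    funext c
    simp [bMatch, List.any_map, Function.comp_def]
  rw [hpred]
  cases HORIZON_FEATURE_CATEGORIES.find? (fun c => c.2.any (fun kw =>
      PySem.Chars.isIn (PySem.Chars.lower kw.toList) (PySem.Chars.lower feature_names[i.toNat].toList))) <;> rfl

-- ===== VERDICT (by name: the statement is the Claim_ definition above) =====
theorem build_category_map_py_spec : Claim_equal_build_category_map_py := by
  intro feature_names _
  unfold Spec_build_category_map_py build_category_map_py build_category_map_py_alt
  rw [PySem.Dict.items_foldl_insert_fresh
        (l := PySem.List.enumerate feature_names 0)
        (k := fun p => p.1)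
        (v := fun p => aCatLoop (PySem.Chars.lower p.2.toList) HORIZON_FEATURE_CATEGORIES)
        (d := PySem.Dict.empty)
        (by intro a _; simp [PySem.Dict.contains_empty])
        (by rw [PySem.List.map_fst_enumerate]; exact PySem.List.nodup_pyRange_one 0 _)]
  rw [PySem.Dict.items_foldl_insert_fresh
        (l := PySem.List.pyRange 0 (PySem.List.len feature_names) 1)
        (k := fun idx => idx)
        (v := fun idx => ((HORIZON_FEATURE_CATEGORIES.foldl
            (fun d c => bInner (feature_names.map (fun f => PySem.Chars.lower f.toList)) d c.1
              (c.2.map (fun k => PySem.Chars.lower k.toList)))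
            PySem.Dict.empty).getD idx "other"))
        (d := PySem.Dict.empty)
        (by intro a _; simp [PySem.Dict.contains_empty])
        (by simpa using PySem.List.nodup_pyRange_one 0 (PySem.List.len feature_names))]
  simp only [PySem.Dict.empty, List.nil_append]
  rw [PySem.List.enumerate_eq_map_pyRange feature_names ""]
  rw [List.map_map]
  apply List.map_congr_left
  intro j hj
  rw [PySem.List.len_eq] at *
  have hj' := (PySem.List.mem_pyRange_one).mp hj
  have h0 : 0 ≤ j := by omega
  have hlt : j.toNat < feature_names.length := by omega
  simp only [Function.comp_apply]
  rw [point_eq feature_names j h0 hlt]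
  rfl
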